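-- pv_equiv track=rewrite | github.com/steve1316/chrono-ark-translator | backend/routes/helpers.py | _fill_duplicate_translations
-- ===== SOURCE A (Python) =====
-- def _fill_duplicate_translations(
--     translations: dict[str, str],
--     entries: list[tuple[str, str]],
-- ) -> dict[str, str]:
--     """Fill missing keys whose source text matches an already-translated entry.
--
--     LLMs often deduplicate identical source strings and only return one key in
--     the response.  This copies the translation to every other key that shares
--     the same source text so nothing is left as "Pending translation...".
--
--     Args:
--         translations: Mutable dict of key -> English text returned by the LLM.
--             Modified in-place to include any missing duplicate keys.
--         entries: Original (key, source_text) tuples sent to the provider.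
--     """
--     source_to_translation: dict[str, str] = {}
--     for key, source_text in entries:
--         if key in translations:
--             source_to_translation[source_text] = translations[key]
--
--     for key, source_text in entries:
--         if key not in translations and source_text in source_to_translation:
--             translations[key] = source_to_translation[source_text]
--
--     return translations
-- ===== SOURCE B (Python) =====
-- def _fill_duplicate_translations(
--     translations: dict[str, str],
--     entries: list[tuple[str, str]],
-- ) -> dict[str, str]:
--     """Group entries by source text: one pass builds, per source, the translated
--     value (last-wins) and the positions of untranslated keys; the fills are then
--     read off the groups, sorted back to original entry order, and applied."""
--     groups: dict[str, tuple] = {}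
--     for pos, (key, source_text) in enumerate(entries):
--         value, pending = groups.get(source_text, (None, []))
--         if key in translations:
--             groups[source_text] = (translations[key], pending)
--         else:
--             groups[source_text] = (value, pending + [(pos, key)])
--
--     fills = [
--         (pos, key, value)
--         for value, pending in groups.values()
--         if value is not None
--         for pos, key in pending
--     ]
--     fills.sort(key=lambda f: f[0])
--     for _, key, value in fills:
--         if key not in translations:
--             translations[key] = value
--     return translations
-- ===== Notes on version B (the rewrite author's own statement) =====
-- stated objective: alternative
-- what changed: B groups entries by source text into a dict of per-source records (last-wins translated value, list of untranslated keys with positions), reads the fills off the group index, sorts them back to original entry order and applies them, instead of A's two full scans of entries with per-entry index lookups.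
import Mathlib
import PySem

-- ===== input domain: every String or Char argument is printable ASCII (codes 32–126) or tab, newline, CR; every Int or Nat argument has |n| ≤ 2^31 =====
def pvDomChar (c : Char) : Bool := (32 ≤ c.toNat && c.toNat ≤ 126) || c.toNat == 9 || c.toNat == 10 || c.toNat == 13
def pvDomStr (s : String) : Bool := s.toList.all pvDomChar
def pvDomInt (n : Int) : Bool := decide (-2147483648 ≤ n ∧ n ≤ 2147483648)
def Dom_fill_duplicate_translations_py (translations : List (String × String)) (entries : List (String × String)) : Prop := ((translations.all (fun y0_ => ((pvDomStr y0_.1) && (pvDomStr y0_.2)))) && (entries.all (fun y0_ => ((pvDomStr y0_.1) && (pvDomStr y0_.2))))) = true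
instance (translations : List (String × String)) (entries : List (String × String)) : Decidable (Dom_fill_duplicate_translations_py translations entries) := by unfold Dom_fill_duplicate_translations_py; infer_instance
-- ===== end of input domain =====

-- B replaces A's two full scans of `entries` by a group index: one pass builds, per source
-- text, a record (last-wins translated value, untranslated keys with positions); the fills are
-- read off the groups, sorted back to entry order and applied (alternative decomposition, same
-- return value; both Pythons mutate `translations` identically, equivalence is about the dict's
-- final contents).

-- ===== PORT A =====
def fill_duplicate_translations_py (translations : List (String × String)) (entries : List (String × String)) : List (String × String) :=
  let t0 : PySem.Dict String String := PySem.Dict.mk translations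
  -- first pass: source_to_translation[source_text] = translations[key] when key in translations
  let m : PySem.Dict String String :=
    entries.foldl (fun m kv =>
      match t0.get? kv.1 with
      | some v => m.insert kv.2 v
      | none => m) PySem.Dict.empty
  -- second pass: fill missing keys from source_to_translation
  let t : PySem.Dict String String :=
    entries.foldl (fun t kv =>
      if (t.get? kv.1).isNone then
        match m.get? kv.2 with
        | some v => t.insert kv.1 v
        | none => t
      else t) t0
  t.items

-- ===== PORT B =====
-- one grouping pass: groups[source] = (translated value | none (last wins), pending (pos, key))
def pvGroupStep (t0 : PySem.Dict String String)
    (g : PySem.Dict String (Option String × List (Int × String)))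
    (pe : Int × (String × String)) : PySem.Dict String (Option String × List (Int × String)) :=
  g.insert pe.2.2
    (match t0.get? pe.2.1 with
     | some v => (some v, (g.getD pe.2.2 (none, [])).2)
     | none => ((g.getD pe.2.2 (none, [])).1, (g.getD pe.2.2 (none, [])).2 ++ [(pe.1, pe.2.1)]))

def fill_duplicate_translations_py_alt (translations : List (String × String)) (entries : List (String × String)) : List (String × String) :=
  let t0 : PySem.Dict String String := PySem.Dict.mk translations
  let groups : PySem.Dict String (Option String × List (Int × String)) :=
    (PySem.List.enumerate entries 0).foldl (pvGroupStep t0) PySem.Dict.empty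
  -- fills = [(pos, key, value) for value, pending in groups.values() if value is not None
  --          for pos, key in pending]
  let fills : List (Int × String × String) :=
    groups.values.flatMap (fun r =>
      match r.1 with
      | some v => r.2.map (fun pk => (pk.1, pk.2, v))
      | none => [])
  let sortedFills := PySem.List.sorted fills (fun f => f.1) false
  let t : PySem.Dict String String :=
    sortedFills.foldl (fun t f =>
      if (t.get? f.2.1).isNone then t.insert f.2.1 f.2.2 else t) t0
  t.items

-- ===== PRECONDITION & SPEC =====
def Spec_fill_duplicate_translations_py (translations : List (String × String)) (entries : List (String × String)) (out : List (String × String)) : Prop := out = fill_duplicate_translations_py_alt translations entries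
instance (translations : List (String × String)) (entries : List (String × String)) (out : List (String × String)) : Decidable (Spec_fill_duplicate_translations_py translations entries out) := by unfold Spec_fill_duplicate_translations_py; infer_instance

-- ===== CLAIM (what is proved, stated in full; the proofs are below) =====
def Claim_equal_fill_duplicate_translations_py : Prop := ∀ (translations : List (String × String)) (entries : List (String × String)), Dom_fill_duplicate_translations_py translations entries → Spec_fill_duplicate_translations_py translations entries (fill_duplicate_translations_py translations entries)

-- ===== LEMMAS AND PROOFS =====

-- per-entry fill candidate: some (pos, key, value) iff the key is untranslated and the source resolvable
def pvCand (t0 m : PySem.Dict String String) (pe : Int × (String × String)) : Option (Int × String × String) :=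
  match t0.get? pe.2.1 with
  | some _ => none
  | none => (m.get? pe.2.2).map (fun v => (pe.1, pe.2.1, v))

-- the common fill-application step
def pvApply (t : PySem.Dict String String) (f : Int × String × String) : PySem.Dict String String :=
  if (t.get? f.2.1).isNone then t.insert f.2.1 f.2.2 else t

-- A's second pass = applying the candidate list in entry order
theorem pvA_pass2 (t0 m : PySem.Dict String String) (l : List (String × String)) (n : Int)
    (t : PySem.Dict String String)
    (hinv : ∀ k, (t0.get? k).isSome → (t.get? k).isSome) :
    l.foldl (fun t kv =>
      if (t.get? kv.1).isNone then
        match m.get? kv.2 with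
        | some v => t.insert kv.1 v
        | none => t
      else t) t
    = ((PySem.List.enumerate l n).filterMap (pvCand t0 m)).foldl pvApply t := by
  induction l generalizing n t with
  | nil => simp [PySem.List.enumerate_nil]
  | cons kv l ih =>
    rw [PySem.List.enumerate_cons]
    simp only [List.foldl_cons, List.filterMap_cons]
    cases hk : t0.get? kv.1 with
    | some v0 =>
      obtain ⟨w, hw⟩ := Option.isSome_iff_exists.mp (hinv kv.1 (by simp [hk]))
      simp only [pvCand, hk, hw, Option.isNone_some, Bool.false_eq_true, if_false]
      exact ih (n + 1) t hinv
    | none =>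
      cases hm : m.get? kv.2 with
      | some v =>
        simp only [pvCand, hk, hm, Option.map_some, List.foldl_cons]
        rw [show (if (t.get? kv.1).isNone = true then t.insert kv.1 v else t)
            = pvApply t (n, kv.1, v) from rfl]
        refine ih (n + 1) _ (fun k hkk => ?_)
        simp only [pvApply]
        split_ifs
        · rw [PySem.Dict.get?_insert]
          split_ifs with he
          · simp
          · exact hinv k hkk
        · exact hinv k hkk
      | none =>
        simp only [pvCand, hk, hm, Option.map_none]
        rw [ite_self]
        exact ih (n + 1) t hinv

-- the grouping pass tracks A's index in its value component
theorem pvVal_track (t0 : PySem.Dict String String) (l : List (String × String)) (n : Int)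
    (g : PySem.Dict String (Option String × List (Int × String))) (m : PySem.Dict String String)
    (h : ∀ s, (g.getD s (none, [])).1 = m.get? s) :
    ∀ s, (((PySem.List.enumerate l n).foldl (pvGroupStep t0) g).getD s (none, [])).1
      = (l.foldl (fun m kv =>
          match t0.get? kv.1 with
          | some v => m.insert kv.2 v
          | none => m) m).get? s := by
  induction l generalizing n g m with
  | nil => simpa [PySem.List.enumerate_nil] using h
  | cons kv l ih =>
    rw [PySem.List.enumerate_cons]
    simp only [List.foldl_cons]
    cases hk : t0.get? kv.1 with
    | some v =>
      refine ih (n + 1) _ _ (fun s => ?_)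
      simp only [pvGroupStep, hk]
      rw [PySem.Dict.getD_insert, PySem.Dict.get?_insert]
      split_ifs with he
      · rfl
      · exact h s
    | none =>
      refine ih (n + 1) _ _ (fun s => ?_)
      simp only [pvGroupStep, hk]
      rw [PySem.Dict.getD_insert]
      split_ifs with he
      · subst he; exact h _
      · exact h s

-- the grouping pass appends the untranslated entries of each source, in order
theorem pvPend_track (t0 : PySem.Dict String String) (l : List (String × String)) (n : Int)
    (g : PySem.Dict String (Option String × List (Int × String))) (s : String) :
    (((PySem.List.enumerate l n).foldl (pvGroupStep t0) g).getD s (none, [])).2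
      = (g.getD s (none, [])).2
        ++ (PySem.List.enumerate l n).filterMap (fun pe =>
             if pe.2.2 = s ∧ t0.get? pe.2.1 = none then some (pe.1, pe.2.1) else none) := by
  induction l generalizing n g with
  | nil => simp [PySem.List.enumerate_nil]
  | cons kv l ih =>
    rw [PySem.List.enumerate_cons]
    simp only [List.foldl_cons, List.filterMap_cons]
    rw [ih (n + 1)]
    cases hk : t0.get? kv.1 with
    | some v =>
      rw [show (if kv.2 = s ∧ (some v : Option String) = none then some (n, kv.1) else none)
          = (none : Option (Int × String)) by simp]
      congr 1
      simp only [pvGroupStep, hk]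
      rw [PySem.Dict.getD_insert]
      split_ifs with he
      · rw [he]
      · rfl
    | none =>
      by_cases he : kv.2 = s
      · rw [if_pos ⟨he, rfl⟩]
        simp only [pvGroupStep, hk]
        rw [PySem.Dict.getD_insert, if_pos he.symm, he]
        simp
      · rw [if_neg (fun hc => he hc.1)]
        congr 1
        simp only [pvGroupStep, hk]
        rw [PySem.Dict.getD_insert, if_neg (fun hc => he hc.symm)]

-- fiber decomposition: concatenating the fibers of σ over the distinct source values permutes l
theorem pvFiber_perm {α : Type} (σ : α → String) (S : List String) (l : List α)
    (hnd : S.Nodup) (hcov : ∀ x ∈ l, σ x ∈ S) :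
    (S.flatMap (fun s => l.filter (fun x => σ x == s))).Perm l := by
  induction S generalizing l with
  | nil =>
    have : l = [] := List.eq_nil_iff_forall_not_mem.mpr (fun x hx => by simpa using hcov x hx)
    simp [this]
  | cons s S' ih =>
    simp only [List.flatMap_cons]
    have hs' : s ∉ S' := (List.nodup_cons.mp hnd).1
    have hmap : ∀ s' ∈ S', l.filter (fun x => σ x == s')
        = (l.filter (fun x => !(σ x == s))).filter (fun x => σ x == s') := by
      intro s' hs'mem
      rw [List.filter_filter]
      apply List.filter_congr
      intro x _
      by_cases hx : σ x = s'
      · have hne : σ x ≠ s := fun hc => hs' (hc ▸ hx ▸ hs'mem)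
        simp only [hx]
        have : ¬ s' = s := fun hc => hne (by rw [hx, hc])
        simp [this]
      · simp [hx]
    rw [List.flatMap_congr hmap]
    have hcov' : ∀ x ∈ l.filter (fun x => !(σ x == s)), σ x ∈ S' := by
      intro x hx
      rw [List.mem_filter] at hx
      have hne : σ x ≠ s := by simpa using hx.2
      have := hcov x hx.1
      simp only [List.mem_cons] at this
      exact this.resolve_left hne
    have ihp := ih (l.filter (fun x => !(σ x == s))) (List.nodup_cons.mp hnd).2 hcov'
    exact (List.Perm.append_left _ ihp).trans (List.filter_append_perm _ l)

-- one fiber's fill candidates, computed from the group record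
theorem pvFiber_cand (t0 m : PySem.Dict String String) (l : List (Int × (String × String))) (s : String) :
    (match m.get? s with
     | some v => (l.filterMap (fun pe =>
         if pe.2.2 = s ∧ t0.get? pe.2.1 = none then some (pe.1, pe.2.1) else none)).map
           (fun pk => (pk.1, pk.2, v))
     | none => [])
    = (l.filter (fun pe => pe.2.2 == s)).filterMap (pvCand t0 m) := by
  cases hm : m.get? s with
  | none =>
    symm
    rw [List.filterMap_eq_nil_iff]
    intro pe hpe
    rw [List.mem_filter] at hpe
    have hs : pe.2.2 = s := by simpa using hpe.2
    cases hk : t0.get? pe.2.1 <;> simp [pvCand, hk, hs, hm]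
  | some v =>
    induction l with
    | nil => simp
    | cons pe l ih =>
      simp only [List.filterMap_cons, List.filter_cons]
      by_cases hs : pe.2.2 = s
      · cases hk : t0.get? pe.2.1 with
        | some w =>
          rw [show (if pe.2.2 = s ∧ (some w : Option String) = none then some (pe.1, pe.2.1) else none)
              = (none : Option (Int × String)) by simp]
          rw [if_pos (by simpa using hs)]
          rw [List.filterMap_cons]
          rw [show pvCand t0 m pe = none by simp [pvCand, hk]]
          exact ih
        | none =>
          rw [if_pos ⟨hs, rfl⟩, if_pos (by simpa using hs)]
          rw [List.map_cons, List.filterMap_cons]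
          rw [show pvCand t0 m pe = some (pe.1, pe.2.1, v) by simp [pvCand, hk, hs, hm]]
          simpa using ih
      · rw [show (if pe.2.2 = s ∧ t0.get? pe.2.1 = none then some (pe.1, pe.2.1) else none)
            = (none : Option (Int × String)) by simp [hs]]
        rw [if_neg (by simpa using hs)]
        exact ih

-- ===== VERDICT (by name: the statement is the Claim_ definition above) =====
-- F pe carries pe's position
theorem pvCand_fst (t0 m : PySem.Dict String String) (pe : Int × (String × String))
    (c : Int × String × String) (h : pvCand t0 m pe = some c) : c.1 = pe.1 := by
  unfold pvCand at h
  cases hk : t0.get? pe.2.1 with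
  | some v => rw [hk] at h; exact absurd h (by simp)
  | none =>
    rw [hk] at h
    cases hm : m.get? pe.2.2 with
    | some v => rw [hm] at h; simp at h; rw [← h]
    | none => rw [hm] at h; exact absurd h (by simp)

-- ===== VERDICT (by name: the statement is the Claim_ definition above) =====
theorem fill_duplicate_translations_py_spec : Claim_equal_fill_duplicate_translations_py := by
  intro translations entries _
  unfold Spec_fill_duplicate_translations_py
  unfold fill_duplicate_translations_py fill_duplicate_translations_py_alt
  simp only []
  set t0 := PySem.Dict.mk translations with ht0
  set enum := PySem.List.enumerate entries 0 with henum
  set idx := entries.foldl (fun m kv =>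
      match t0.get? kv.1 with
      | some v => m.insert kv.2 v
      | none => m) PySem.Dict.empty with hidx
  set G := enum.foldl (pvGroupStep t0) PySem.Dict.empty with hG
  set F := pvCand t0 idx with hF
  set target := enum.filterMap F with htarget
  -- A's second pass applies the candidates in entry order
  have hA : entries.foldl (fun t kv =>
      if (t.get? kv.1).isNone then
        match idx.get? kv.2 with
        | some v => t.insert kv.1 v
        | none => t
      else t) t0 = target.foldl pvApply t0 := by
    rw [htarget, hF, henum]
    exact pvA_pass2 t0 idx entries 0 t0 (fun k hk => hk)
  -- the groups index: keys, their distinctness, and each record's two components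
  have hkeys : G.keys = PySem.Set.ofList (enum.map (fun pe => pe.2.2)) := by
    rw [hG, show pvGroupStep t0 = (fun g pe =>
        g.insert pe.2.2 ((fun (g : PySem.Dict String (Option String × List (Int × String))) pe =>
          match t0.get? pe.2.1 with
          | some v => (some v, (g.getD pe.2.2 (none, [])).2)
          | none => ((g.getD pe.2.2 (none, [])).1,
              (g.getD pe.2.2 (none, [])).2 ++ [(pe.1, pe.2.1)])) g pe)) from rfl]
    rw [PySem.Dict.keys_foldl_insert_key]
    simp [PySem.Set.update_nil_left]
  have hnodup : G.keys.Nodup := by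
    rw [hkeys]; exact PySem.Set.nodup_ofList _
  have hget : ∀ s, G.getD s (none, []) = (idx.get? s,
      enum.filterMap (fun pe =>
        if pe.2.2 = s ∧ t0.get? pe.2.1 = none then some (pe.1, pe.2.1) else none)) := by
    intro s
    have h1 := pvVal_track t0 entries 0 PySem.Dict.empty PySem.Dict.empty
      (fun s => by simp [PySem.Dict.getD_empty, PySem.Dict.get?_empty]) s
    have h2 := pvPend_track t0 entries 0 PySem.Dict.empty s
    rw [← henum, ← hG] at h1 h2
    rw [← hidx] at h1
    exact Prod.ext h1 (by rw [h2]; simp [PySem.Dict.getD_empty])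
  -- B's fills list, read off the groups, is the candidates grouped by source
  have hfills : G.values.flatMap (fun r =>
      match r.1 with
      | some v => r.2.map (fun pk => (pk.1, pk.2, v))
      | none => []) =
      (G.keys.flatMap (fun s => enum.filter (fun pe => pe.2.2 == s))).filterMap F := by
    rw [PySem.Dict.values_eq_map_keys G hnodup (none, []), List.flatMap_map,
      List.filterMap_flatMap]
    apply List.flatMap_congr
    intro s _
    rw [hget s, hF]
    exact pvFiber_cand t0 idx enum s
  -- those grouped candidates are a permutation of the candidates in entry order
  have hperm : (G.keys.flatMap (fun s => enum.filter (fun pe => pe.2.2 == s))).Perm enum := by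
    apply pvFiber_perm (fun pe => pe.2.2) G.keys enum hnodup
    intro x hx
    rw [hkeys]
    exact (PySem.Set.mem_ofList _ _).mpr (List.mem_map_of_mem hx)
  have htperm : target.Perm
      ((G.keys.flatMap (fun s => enum.filter (fun pe => pe.2.2 == s))).filterMap F) :=
    (hperm.filterMap F).symm
  -- the candidates in entry order are strictly increasing in position
  have htpair : target.Pairwise (fun a b => a.1 < b.1) := by
    rw [htarget, List.pairwise_filterMap]
    refine (PySem.List.pairwise_lt_enumerate entries 0).imp ?_
    intro a b h c hc c' hc'
    rw [pvCand_fst t0 idx a c hc, pvCand_fst t0 idx b c' hc']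
    exact h
  -- so sorting B's fills by position recovers exactly the candidate list
  have hsorted : PySem.List.sorted (G.values.flatMap (fun r =>
      match r.1 with
      | some v => r.2.map (fun pk => (pk.1, pk.2, v))
      | none => [])) (fun f => f.1) false = target := by
    rw [hfills]
    exact PySem.List.sorted_eq_of_perm_of_pairwise_lt _ _ _ htperm htpair
  rw [hA, hsorted]
  rfl
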